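-- pv_equiv track=rewrite | github.com/maogongfei-dot/rentalai-backend | rental_app/module3_risk_result.py | detect_scenario
-- ===== SOURCE A (Python) =====
-- def detect_scenario(risk_flags, law_topics, input_type: str = "") -> str:
--     """
--     根据当前风险标记、法律主题和输入类型识别具体租房场景，供证据-动作-结果闭环使用。
--     无法明确识别时返回 general_rental_issue。
--     """
--     flags = set(f for f in (risk_flags or []) if isinstance(f, str))
--     topics = set(t for t in (law_topics or []) if isinstance(t, str))
--
--     if "deposit_risk" in flags or "deposit_dispute" in flags or "deposit_protection" in topics:
--         return "deposit_dispute"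
--     if "rent_increase_risk" in flags or "rent_increase" in topics:
--         return "rent_increase"
--     if "notice_risk" in flags or "eviction_risk" in flags or "termination_risk" in flags or "termination_notice" in topics:
--         return "termination_exit"
--     if "repair_risk" in flags or "repair_issue" in flags or "repair_obligation" in topics:
--         return "repair_issue"
--     if "fee_charge_risk" in flags or "fee_issue" in flags or "illegal_fee" in flags or "prohibited_fees" in topics:
--         return "fee_issue"
--     if "unfair_clause" in flags or "unfair_terms" in topics:
--         return "unfair_contract_clause"
--     return "general_rental_issue"
-- ===== SOURCE B (Python) =====
-- # Inverted index: keyword -> priority, one pass over the inputs with a min accumulator.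
-- FLAG_PRIORITY = {
--     "deposit_risk": 0, "deposit_dispute": 0,
--     "rent_increase_risk": 1,
--     "notice_risk": 2, "eviction_risk": 2, "termination_risk": 2,
--     "repair_risk": 3, "repair_issue": 3,
--     "fee_charge_risk": 4, "fee_issue": 4, "illegal_fee": 4,
--     "unfair_clause": 5,
-- }
-- TOPIC_PRIORITY = {
--     "deposit_protection": 0, "rent_increase": 1, "termination_notice": 2,
--     "repair_obligation": 3, "prohibited_fees": 4, "unfair_terms": 5,
-- }
-- SCENARIOS = ["deposit_dispute", "rent_increase", "termination_exit",
--              "repair_issue", "fee_issue", "unfair_contract_clause"]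
--
-- def detect_scenario(risk_flags, law_topics, input_type: str = "") -> str:
--     best = 6
--     for f in (risk_flags or []):
--         if isinstance(f, str):
--             best = min(best, FLAG_PRIORITY.get(f, 6))
--     for t in (law_topics or []):
--         if isinstance(t, str):
--             best = min(best, TOPIC_PRIORITY.get(t, 6))
--     return SCENARIOS[best] if best < 6 else "general_rental_issue"
-- ===== Notes on version B (the rewrite author's own statement) =====
-- stated objective: alternative
-- what changed: A scans a fixed if-chain testing rule keywords against sets built from the input; B inverts the data structure: a keyword-to-priority index is consulted once per input element in a single min-accumulator pass over the input lists, and the answer is an array lookup by the minimal priority.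
import Mathlib
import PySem

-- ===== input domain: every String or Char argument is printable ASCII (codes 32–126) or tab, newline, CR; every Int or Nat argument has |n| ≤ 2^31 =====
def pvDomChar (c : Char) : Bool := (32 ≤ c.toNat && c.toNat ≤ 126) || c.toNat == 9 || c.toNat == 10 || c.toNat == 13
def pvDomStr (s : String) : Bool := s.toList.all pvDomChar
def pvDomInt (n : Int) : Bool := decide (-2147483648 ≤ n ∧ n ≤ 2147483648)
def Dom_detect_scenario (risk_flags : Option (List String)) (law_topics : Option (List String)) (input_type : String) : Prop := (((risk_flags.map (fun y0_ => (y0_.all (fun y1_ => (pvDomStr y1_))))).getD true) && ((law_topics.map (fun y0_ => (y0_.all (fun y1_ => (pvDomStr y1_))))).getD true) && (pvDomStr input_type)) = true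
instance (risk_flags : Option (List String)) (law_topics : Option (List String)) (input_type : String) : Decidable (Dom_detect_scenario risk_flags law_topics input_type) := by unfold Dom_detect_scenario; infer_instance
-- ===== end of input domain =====

-- B replaces A's if-chain over keyword sets by an inverted keyword→priority index consulted
-- in one min-accumulator pass over the input lists (objective: alternative).

-- ===== PORT A =====
-- Note: the Python 'isinstance(f, str)' filter keeps every element here, since the list is typed List String.
def detect_scenario (risk_flags : Option (List String)) (law_topics : Option (List String)) (input_type : String) : String :=
  let flags : PySem.Set String := PySem.Set.ofList (risk_flags.getD [])
  let topics : PySem.Set String := PySem.Set.ofList (law_topics.getD [])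
  if "deposit_risk" ∈ flags ∨ "deposit_dispute" ∈ flags ∨ "deposit_protection" ∈ topics then "deposit_dispute"
  else if "rent_increase_risk" ∈ flags ∨ "rent_increase" ∈ topics then "rent_increase"
  else if "notice_risk" ∈ flags ∨ "eviction_risk" ∈ flags ∨ "termination_risk" ∈ flags ∨ "termination_notice" ∈ topics then "termination_exit"
  else if "repair_risk" ∈ flags ∨ "repair_issue" ∈ flags ∨ "repair_obligation" ∈ topics then "repair_issue"
  else if "fee_charge_risk" ∈ flags ∨ "fee_issue" ∈ flags ∨ "illegal_fee" ∈ flags ∨ "prohibited_fees" ∈ topics then "fee_issue"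
  else if "unfair_clause" ∈ flags ∨ "unfair_terms" ∈ topics then "unfair_contract_clause"
  else "general_rental_issue"

-- ===== PORT B =====
def dsFlagPriority : PySem.Dict String Nat := PySem.Dict.mk
  [("deposit_risk", 0), ("deposit_dispute", 0),
   ("rent_increase_risk", 1),
   ("notice_risk", 2), ("eviction_risk", 2), ("termination_risk", 2),
   ("repair_risk", 3), ("repair_issue", 3),
   ("fee_charge_risk", 4), ("fee_issue", 4), ("illegal_fee", 4),
   ("unfair_clause", 5)]

def dsTopicPriority : PySem.Dict String Nat := PySem.Dict.mk
  [("deposit_protection", 0), ("rent_increase", 1), ("termination_notice", 2),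
   ("repair_obligation", 3), ("prohibited_fees", 4), ("unfair_terms", 5)]

def dsScenarios : List String :=
  ["deposit_dispute", "rent_increase", "termination_exit",
   "repair_issue", "fee_issue", "unfair_contract_clause"]

-- Note: the Python 'isinstance' guards keep every element here (the lists are typed List String).
def detect_scenario_alt (risk_flags : Option (List String)) (law_topics : Option (List String)) (input_type : String) : String :=
  let best1 := (risk_flags.getD []).foldl (fun b f => min b (PySem.Dict.getD dsFlagPriority f 6)) 6
  let best := (law_topics.getD []).foldl (fun b t => min b (PySem.Dict.getD dsTopicPriority t 6)) best1
  if best < 6 then dsScenarios.getD best "general_rental_issue" else "general_rental_issue"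

-- ===== PRECONDITION & SPEC =====
def Spec_detect_scenario (risk_flags : Option (List String)) (law_topics : Option (List String)) (input_type : String) (out : String) : Prop := out = detect_scenario_alt risk_flags law_topics input_type
instance (risk_flags : Option (List String)) (law_topics : Option (List String)) (input_type : String) (out : String) : Decidable (Spec_detect_scenario risk_flags law_topics input_type out) := by unfold Spec_detect_scenario; infer_instance

-- ===== CLAIM =====
def Claim_equal_detect_scenario : Prop := ∀ (risk_flags : Option (List String)) (law_topics : Option (List String)) (input_type : String), Dom_detect_scenario risk_flags law_topics input_type → Spec_detect_scenario risk_flags law_topics input_type (detect_scenario risk_flags law_topics input_type)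

-- ===== LEMMAS AND PROOFS =====

-- characterisation of the min-accumulator fold
theorem ds_foldl_min_le_iff (g : String → Nat) (xs : List String) (a k : Nat) :
    List.foldl (fun b x => min b (g x)) a xs ≤ k ↔ a ≤ k ∨ ∃ x ∈ xs, g x ≤ k := by
  induction xs generalizing a with
  | nil => simp
  | cons y ys ih =>
    simp only [List.foldl_cons, ih, min_le_iff, List.mem_cons]
    constructor
    · rintro ((h | h) | ⟨x, hx, hgx⟩)
      · exact Or.inl h
      · exact Or.inr ⟨y, Or.inl rfl, h⟩
      · exact Or.inr ⟨x, Or.inr hx, hgx⟩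
    · rintro (h | ⟨x, (rfl | hx), hgx⟩)
      · exact Or.inl (Or.inl h)
      · exact Or.inl (Or.inr hgx)
      · exact Or.inr ⟨x, hx, hgx⟩

theorem ds_getD_ite {c : Prop} [Decidable c] (a : Nat) (o : Option Nat) (d : Nat) :
    (if c then some a else o).getD d = if c then a else o.getD d := by split_ifs <;> rfl

-- the flag-priority dictionary, as a case split on its keys
theorem ds_flag_val (x : String) : PySem.Dict.getD dsFlagPriority x 6 =
    if x = "deposit_risk" then 0 else if x = "deposit_dispute" then 0
    else if x = "rent_increase_risk" then 1
    else if x = "notice_risk" then 2 else if x = "eviction_risk" then 2 else if x = "termination_risk" then 2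
    else if x = "repair_risk" then 3 else if x = "repair_issue" then 3
    else if x = "fee_charge_risk" then 4 else if x = "fee_issue" then 4 else if x = "illegal_fee" then 4
    else if x = "unfair_clause" then 5 else 6 := by
  simp only [dsFlagPriority, PySem.Dict.getD, PySem.Dict.get?_mk_cons, beq_iff_eq,
    eq_comm (b := x), ds_getD_ite]
  simp only [PySem.Dict.get?, List.find?_nil, Option.map_none, Option.getD_none]

-- the topic-priority dictionary, as a case split on its keys
theorem ds_topic_val (x : String) : PySem.Dict.getD dsTopicPriority x 6 =
    if x = "deposit_protection" then 0 else if x = "rent_increase" then 1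
    else if x = "termination_notice" then 2 else if x = "repair_obligation" then 3
    else if x = "prohibited_fees" then 4 else if x = "unfair_terms" then 5 else 6 := by
  simp only [dsTopicPriority, PySem.Dict.getD, PySem.Dict.get?_mk_cons, beq_iff_eq,
    eq_comm (b := x), ds_getD_ite]
  simp only [PySem.Dict.get?, List.find?_nil, Option.map_none, Option.getD_none]

-- literal lookups, evaluated once
theorem ds_f0a : PySem.Dict.getD dsFlagPriority "deposit_risk" 6 = 0 := by decide
theorem ds_f0b : PySem.Dict.getD dsFlagPriority "deposit_dispute" 6 = 0 := by decide
theorem ds_f1 : PySem.Dict.getD dsFlagPriority "rent_increase_risk" 6 = 1 := by decide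
theorem ds_f2a : PySem.Dict.getD dsFlagPriority "notice_risk" 6 = 2 := by decide
theorem ds_f2b : PySem.Dict.getD dsFlagPriority "eviction_risk" 6 = 2 := by decide
theorem ds_f2c : PySem.Dict.getD dsFlagPriority "termination_risk" 6 = 2 := by decide
theorem ds_f3a : PySem.Dict.getD dsFlagPriority "repair_risk" 6 = 3 := by decide
theorem ds_f3b : PySem.Dict.getD dsFlagPriority "repair_issue" 6 = 3 := by decide
theorem ds_f4a : PySem.Dict.getD dsFlagPriority "fee_charge_risk" 6 = 4 := by decide
theorem ds_f4b : PySem.Dict.getD dsFlagPriority "fee_issue" 6 = 4 := by decide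
theorem ds_f4c : PySem.Dict.getD dsFlagPriority "illegal_fee" 6 = 4 := by decide
theorem ds_f5 : PySem.Dict.getD dsFlagPriority "unfair_clause" 6 = 5 := by decide
theorem ds_t0 : PySem.Dict.getD dsTopicPriority "deposit_protection" 6 = 0 := by decide
theorem ds_t1 : PySem.Dict.getD dsTopicPriority "rent_increase" 6 = 1 := by decide
theorem ds_t2 : PySem.Dict.getD dsTopicPriority "termination_notice" 6 = 2 := by decide
theorem ds_t3 : PySem.Dict.getD dsTopicPriority "repair_obligation" 6 = 3 := by decide
theorem ds_t4 : PySem.Dict.getD dsTopicPriority "prohibited_fees" 6 = 4 := by decide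
theorem ds_t5 : PySem.Dict.getD dsTopicPriority "unfair_terms" 6 = 5 := by decide

-- which flags can reach priority ≤ k
set_option maxHeartbeats 1600000 in
theorem ds_exF (fl : List String) (k : Nat) (hk : k < 6) :
    (∃ x ∈ fl, PySem.Dict.getD dsFlagPriority x 6 ≤ k) ↔
    ("deposit_risk" ∈ fl ∨ "deposit_dispute" ∈ fl
     ∨ ("rent_increase_risk" ∈ fl ∧ 1 ≤ k)
     ∨ ("notice_risk" ∈ fl ∧ 2 ≤ k) ∨ ("eviction_risk" ∈ fl ∧ 2 ≤ k) ∨ ("termination_risk" ∈ fl ∧ 2 ≤ k)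
     ∨ ("repair_risk" ∈ fl ∧ 3 ≤ k) ∨ ("repair_issue" ∈ fl ∧ 3 ≤ k)
     ∨ ("fee_charge_risk" ∈ fl ∧ 4 ≤ k) ∨ ("fee_issue" ∈ fl ∧ 4 ≤ k) ∨ ("illegal_fee" ∈ fl ∧ 4 ≤ k)
     ∨ ("unfair_clause" ∈ fl ∧ 5 ≤ k)) := by
  constructor
  · rintro ⟨x, hx, hgx⟩
    rw [ds_flag_val] at hgx
    split_ifs at hgx with h1 h2 h3 h4 h5 h6 h7 h8 h9 h10 h11 h12
    · exact (Or.inl (h1 ▸ hx))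
    · exact (Or.inr (Or.inl (h2 ▸ hx)))
    · exact (Or.inr (Or.inr (Or.inl ⟨h3 ▸ hx, hgx⟩)))
    · exact (Or.inr (Or.inr (Or.inr (Or.inl ⟨h4 ▸ hx, hgx⟩))))
    · exact (Or.inr (Or.inr (Or.inr (Or.inr (Or.inl ⟨h5 ▸ hx, hgx⟩)))))
    · exact (Or.inr (Or.inr (Or.inr (Or.inr (Or.inr (Or.inl ⟨h6 ▸ hx, hgx⟩))))))
    · exact (Or.inr (Or.inr (Or.inr (Or.inr (Or.inr (Or.inr (Or.inl ⟨h7 ▸ hx, hgx⟩)))))))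
    · exact (Or.inr (Or.inr (Or.inr (Or.inr (Or.inr (Or.inr (Or.inr (Or.inl ⟨h8 ▸ hx, hgx⟩))))))))
    · exact (Or.inr (Or.inr (Or.inr (Or.inr (Or.inr (Or.inr (Or.inr (Or.inr (Or.inl ⟨h9 ▸ hx, hgx⟩)))))))))
    · exact (Or.inr (Or.inr (Or.inr (Or.inr (Or.inr (Or.inr (Or.inr (Or.inr (Or.inr (Or.inl ⟨h10 ▸ hx, hgx⟩))))))))))
    · exact (Or.inr (Or.inr (Or.inr (Or.inr (Or.inr (Or.inr (Or.inr (Or.inr (Or.inr (Or.inr (Or.inl ⟨h11 ▸ hx, hgx⟩)))))))))))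
    · exact (Or.inr (Or.inr (Or.inr (Or.inr (Or.inr (Or.inr (Or.inr (Or.inr (Or.inr (Or.inr (Or.inr ⟨h12 ▸ hx, hgx⟩)))))))))))
    · omega
  · rintro (h | h | ⟨h, hk1⟩ | ⟨h, hk1⟩ | ⟨h, hk1⟩ | ⟨h, hk1⟩ | ⟨h, hk1⟩ | ⟨h, hk1⟩ | ⟨h, hk1⟩ | ⟨h, hk1⟩ | ⟨h, hk1⟩ | ⟨h, hk1⟩)
    · exact ⟨_, h, by rw [ds_f0a]; omega⟩
    · exact ⟨_, h, by rw [ds_f0b]; omega⟩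
    · exact ⟨_, h, by rw [ds_f1]; omega⟩
    · exact ⟨_, h, by rw [ds_f2a]; omega⟩
    · exact ⟨_, h, by rw [ds_f2b]; omega⟩
    · exact ⟨_, h, by rw [ds_f2c]; omega⟩
    · exact ⟨_, h, by rw [ds_f3a]; omega⟩
    · exact ⟨_, h, by rw [ds_f3b]; omega⟩
    · exact ⟨_, h, by rw [ds_f4a]; omega⟩
    · exact ⟨_, h, by rw [ds_f4b]; omega⟩
    · exact ⟨_, h, by rw [ds_f4c]; omega⟩
    · exact ⟨_, h, by rw [ds_f5]; omega⟩

-- which topics can reach priority ≤ k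
set_option maxHeartbeats 1600000 in
theorem ds_exT (tp : List String) (k : Nat) (hk : k < 6) :
    (∃ x ∈ tp, PySem.Dict.getD dsTopicPriority x 6 ≤ k) ↔
    ("deposit_protection" ∈ tp
     ∨ ("rent_increase" ∈ tp ∧ 1 ≤ k) ∨ ("termination_notice" ∈ tp ∧ 2 ≤ k)
     ∨ ("repair_obligation" ∈ tp ∧ 3 ≤ k) ∨ ("prohibited_fees" ∈ tp ∧ 4 ≤ k)
     ∨ ("unfair_terms" ∈ tp ∧ 5 ≤ k)) := by
  constructor
  · rintro ⟨x, hx, hgx⟩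
    rw [ds_topic_val] at hgx
    split_ifs at hgx with h1 h2 h3 h4 h5 h6
    · exact (Or.inl (h1 ▸ hx))
    · exact (Or.inr (Or.inl ⟨h2 ▸ hx, hgx⟩))
    · exact (Or.inr (Or.inr (Or.inl ⟨h3 ▸ hx, hgx⟩)))
    · exact (Or.inr (Or.inr (Or.inr (Or.inl ⟨h4 ▸ hx, hgx⟩))))
    · exact (Or.inr (Or.inr (Or.inr (Or.inr (Or.inl ⟨h5 ▸ hx, hgx⟩)))))
    · exact (Or.inr (Or.inr (Or.inr (Or.inr (Or.inr ⟨h6 ▸ hx, hgx⟩)))))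
    · omega
  · rintro (h | ⟨h, hk1⟩ | ⟨h, hk1⟩ | ⟨h, hk1⟩ | ⟨h, hk1⟩ | ⟨h, hk1⟩)
    · exact ⟨_, h, by rw [ds_t0]; omega⟩
    · exact ⟨_, h, by rw [ds_t1]; omega⟩
    · exact ⟨_, h, by rw [ds_t2]; omega⟩
    · exact ⟨_, h, by rw [ds_t3]; omega⟩
    · exact ⟨_, h, by rw [ds_t4]; omega⟩
    · exact ⟨_, h, by rw [ds_t5]; omega⟩

-- the minimal priority over both input lists equals the index of A's first firing branch
set_option maxHeartbeats 1600000 in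
theorem ds_best_eq (fl tp : List String) :
    List.foldl (fun b t => min b (PySem.Dict.getD dsTopicPriority t 6))
      (List.foldl (fun b f => min b (PySem.Dict.getD dsFlagPriority f 6)) 6 fl) tp =
    (if "deposit_risk" ∈ fl ∨ "deposit_dispute" ∈ fl ∨ "deposit_protection" ∈ tp then 0
     else if "rent_increase_risk" ∈ fl ∨ "rent_increase" ∈ tp then 1
     else if "notice_risk" ∈ fl ∨ "eviction_risk" ∈ fl ∨ "termination_risk" ∈ fl ∨ "termination_notice" ∈ tp then 2
     else if "repair_risk" ∈ fl ∨ "repair_issue" ∈ fl ∨ "repair_obligation" ∈ tp then 3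
     else if "fee_charge_risk" ∈ fl ∨ "fee_issue" ∈ fl ∨ "illegal_fee" ∈ fl ∨ "prohibited_fees" ∈ tp then 4
     else if "unfair_clause" ∈ fl ∨ "unfair_terms" ∈ tp then 5
     else 6) := by
  set best := List.foldl (fun b t => min b (PySem.Dict.getD dsTopicPriority t 6))
      (List.foldl (fun b f => min b (PySem.Dict.getD dsFlagPriority f 6)) 6 fl) tp with hbest
  have hle : ∀ k, k < 6 → (best ≤ k ↔
      (("deposit_risk" ∈ fl ∨ "deposit_dispute" ∈ fl
        ∨ ("rent_increase_risk" ∈ fl ∧ 1 ≤ k)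
        ∨ ("notice_risk" ∈ fl ∧ 2 ≤ k) ∨ ("eviction_risk" ∈ fl ∧ 2 ≤ k) ∨ ("termination_risk" ∈ fl ∧ 2 ≤ k)
        ∨ ("repair_risk" ∈ fl ∧ 3 ≤ k) ∨ ("repair_issue" ∈ fl ∧ 3 ≤ k)
        ∨ ("fee_charge_risk" ∈ fl ∧ 4 ≤ k) ∨ ("fee_issue" ∈ fl ∧ 4 ≤ k) ∨ ("illegal_fee" ∈ fl ∧ 4 ≤ k)
        ∨ ("unfair_clause" ∈ fl ∧ 5 ≤ k))
       ∨ ("deposit_protection" ∈ tp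
        ∨ ("rent_increase" ∈ tp ∧ 1 ≤ k) ∨ ("termination_notice" ∈ tp ∧ 2 ≤ k)
        ∨ ("repair_obligation" ∈ tp ∧ 3 ≤ k) ∨ ("prohibited_fees" ∈ tp ∧ 4 ≤ k)
        ∨ ("unfair_terms" ∈ tp ∧ 5 ≤ k)))) := by
    intro k hk
    have h6 : ¬ (6:Nat) ≤ k := by omega
    rw [hbest, ds_foldl_min_le_iff, ds_foldl_min_le_iff, ds_exF fl k hk, ds_exT tp k hk]
    simp [h6, or_assoc]
  by_cases hc0 : "deposit_risk" ∈ fl ∨ "deposit_dispute" ∈ fl ∨ "deposit_protection" ∈ tp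
  · rw [if_pos hc0]
    have hub : best ≤ 0 := (hle 0 (by norm_num)).2 (by norm_num; tauto)
    omega
  rw [if_neg hc0]
  by_cases hc1 : "rent_increase_risk" ∈ fl ∨ "rent_increase" ∈ tp
  · rw [if_pos hc1]
    have hub : best ≤ 1 := (hle 1 (by norm_num)).2 (by norm_num; tauto)
    have hlb : ¬ best ≤ 0 := by
      intro hb; have h := (hle 0 (by norm_num)).1 hb; norm_num at h; tauto
    omega
  rw [if_neg hc1]
  by_cases hc2 : "notice_risk" ∈ fl ∨ "eviction_risk" ∈ fl ∨ "termination_risk" ∈ fl ∨ "termination_notice" ∈ tp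
  · rw [if_pos hc2]
    have hub : best ≤ 2 := (hle 2 (by norm_num)).2 (by norm_num; tauto)
    have hlb : ¬ best ≤ 1 := by
      intro hb; have h := (hle 1 (by norm_num)).1 hb; norm_num at h; tauto
    omega
  rw [if_neg hc2]
  by_cases hc3 : "repair_risk" ∈ fl ∨ "repair_issue" ∈ fl ∨ "repair_obligation" ∈ tp
  · rw [if_pos hc3]
    have hub : best ≤ 3 := (hle 3 (by norm_num)).2 (by norm_num; tauto)
    have hlb : ¬ best ≤ 2 := by
      intro hb; have h := (hle 2 (by norm_num)).1 hb; norm_num at h; tauto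
    omega
  rw [if_neg hc3]
  by_cases hc4 : "fee_charge_risk" ∈ fl ∨ "fee_issue" ∈ fl ∨ "illegal_fee" ∈ fl ∨ "prohibited_fees" ∈ tp
  · rw [if_pos hc4]
    have hub : best ≤ 4 := (hle 4 (by norm_num)).2 (by norm_num; tauto)
    have hlb : ¬ best ≤ 3 := by
      intro hb; have h := (hle 3 (by norm_num)).1 hb; norm_num at h; tauto
    omega
  rw [if_neg hc4]
  by_cases hc5 : "unfair_clause" ∈ fl ∨ "unfair_terms" ∈ tp
  · rw [if_pos hc5]
    have hub : best ≤ 5 := (hle 5 (by norm_num)).2 (by norm_num; tauto)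
    have hlb : ¬ best ≤ 4 := by
      intro hb; have h := (hle 4 (by norm_num)).1 hb; norm_num at h; tauto
    omega
  rw [if_neg hc5]
  have hub : best ≤ 6 := by
    rw [hbest, ds_foldl_min_le_iff]
    exact Or.inl (by rw [ds_foldl_min_le_iff]; exact Or.inl (by norm_num))
  have hlb : ¬ best ≤ 5 := by
    intro hb; have h := (hle 5 (by norm_num)).1 hb; norm_num at h; tauto
  omega

-- ===== VERDICT =====
theorem detect_scenario_spec : Claim_equal_detect_scenario := by
  intro rf lt it _
  unfold Spec_detect_scenario detect_scenario detect_scenario_alt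
  simp only [PySem.Set.mem_ofList]
  rw [ds_best_eq]
  split_ifs <;> first | rfl | omega
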